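-- pv_equiv track=rewrite | github.com/Erechtheus/ner_LSTM | helper/parseCorpus.py | tokenToId
-- ===== SOURCE A (Python) =====
-- def tokenToId(data, lower=True):
--     token2Id = {}
--     for sentences in data:
--         for token in sentences:
--             if lower == True:
--                 token = token.lower()
--             if token not in token2Id.keys():
--                 token2Id[token] = len(token2Id) +1 #We start with ID=1, as ID=0 is the special token for padding
--     return token2Id
-- ===== SOURCE B (Python) =====
-- def tokenToId(data, lower=True):
--     stream = [tok for sentence in data for tok in sentence]
--     if lower == True:
--         stream = [tok.lower() for tok in stream]
--     first = {tok: pos for pos, tok in reversed(list(enumerate(stream)))}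
--     ordered = sorted(first, key=first.get)
--     return {tok: rank + 1 for rank, tok in enumerate(ordered)}
-- ===== Notes on version B (the rewrite author's own statement) =====
-- stated objective: alternative
-- what changed: Replaces the guarded insertion loop with a staged pipeline: flatten, build a token->first-position map by a single backward overwrite pass over reversed(enumerate(stream)) (no membership tests), sort the distinct tokens by that first position, then enumerate to assign ids from 1.
import Mathlib
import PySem

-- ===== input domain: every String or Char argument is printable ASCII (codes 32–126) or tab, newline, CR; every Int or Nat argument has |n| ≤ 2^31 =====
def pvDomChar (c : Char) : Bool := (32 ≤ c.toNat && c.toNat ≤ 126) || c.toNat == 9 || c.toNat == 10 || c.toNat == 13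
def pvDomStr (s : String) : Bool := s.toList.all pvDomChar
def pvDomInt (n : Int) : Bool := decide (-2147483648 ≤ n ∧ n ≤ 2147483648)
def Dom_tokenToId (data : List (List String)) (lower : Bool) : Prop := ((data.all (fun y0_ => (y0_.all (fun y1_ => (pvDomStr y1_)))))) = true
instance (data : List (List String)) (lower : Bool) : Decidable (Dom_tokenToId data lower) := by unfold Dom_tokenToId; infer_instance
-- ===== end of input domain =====

-- B flattens, then recovers first-occurrence order by sorting the distinct tokens on their first index, then enumerates ids from 1 (alternative algorithm, not claimed faster).


-- ===== PORT A =====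
def tokenToId (data : List (List String)) (lower : Bool) : List (String × Int) :=
  (data.foldl (fun token2Id sentences =>
    sentences.foldl (fun token2Id token =>
      let token := if lower == true then PySem.Str.lower token else token
      if (PySem.Dict.keys token2Id).contains token then token2Id
      else PySem.Dict.insert token2Id token ((PySem.Dict.size token2Id : Int) + 1))
      token2Id)
    PySem.Dict.empty).items

-- ===== PORT B =====
-- Source B: flatten; lower if lower == True; dict comprehension over reversed(list(enumerate(stream)))
-- (overwrite leaves the FIRST position); sorted(first, key=first.get) — every key is present, so
-- first.get never returns None and '.getD 0' is exact; then ids from 1 via enumerate.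
def tokenToId_alt (data : List (List String)) (lower : Bool) : List (String × Int) :=
  let stream0 := data.flatMap (fun sentence => sentence)
  let stream := if lower == true then stream0.map PySem.Str.lower else stream0
  let first := (PySem.List.enumerate stream 0).reverse.foldl
      (fun d p => PySem.Dict.insert d p.2 p.1) (PySem.Dict.empty : PySem.Dict String Int)
  let ordered := PySem.List.sorted (PySem.Dict.keys first)
      (fun tok => (PySem.Dict.get? first tok).getD 0) false
  (PySem.List.enumerate ordered 0).map (fun p => (p.2, p.1 + 1))

-- ===== PRECONDITION & SPEC =====
def Spec_tokenToId (data : List (List String)) (lower : Bool) (out : List (String × Int)) : Prop := out = tokenToId_alt data lower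
instance (data : List (List String)) (lower : Bool) (out : List (String × Int)) : Decidable (Spec_tokenToId data lower out) := by unfold Spec_tokenToId; infer_instance

-- ===== CLAIM (what is proved, stated in full; the proofs are below) =====
def Claim_equal_tokenToId : Prop := ∀ (data : List (List String)) (lower : Bool), Dom_tokenToId data lower → Spec_tokenToId data lower (tokenToId data lower)

-- ===== LEMMAS AND PROOFS =====

-- the dict A's loop maintains, as a function of the list of distinct tokens seen so far
def pvEnc (acc : List String) : PySem.Dict String Int :=
  ⟨(PySem.List.enumerate acc 0).map (fun p => (p.2, p.1 + 1))⟩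

theorem pvEnc_keys (acc : List String) : (pvEnc acc).keys = acc := by
  simp [pvEnc, PySem.Dict.keys, Function.comp_def, PySem.List.map_snd_enumerate]

theorem pvEnc_size (acc : List String) : (pvEnc acc).size = acc.length := by
  simp [pvEnc, PySem.Dict.size, PySem.List.length_enumerate]

theorem pvEnc_contains (acc : List String) (t : String) :
    (pvEnc acc).contains t = acc.contains t := by
  simp only [PySem.Dict.contains, pvEnc, List.any_map]
  show ((PySem.List.enumerate acc 0).any fun x => x.2 == t) = acc.contains t
  suffices h : ∀ s : Int, ((PySem.List.enumerate acc s).any fun x => x.2 == t) = acc.contains t from h 0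
  induction acc with
  | nil => intro s; rfl
  | cons a as ih =>
    intro s
    simp only [PySem.List.enumerate_cons, List.any_cons, ih]
    by_cases h : t = a
    · subst h; simp
    · have h' : ¬ a = t := fun hh => h hh.symm
      simp [h, h']

theorem pvEnc_snoc (acc : List String) (t : String) :
    pvEnc (acc ++ [t]) = PySem.Dict.mk ((pvEnc acc).items ++ [(t, (acc.length : Int) + 1)]) := by
  simp [pvEnc, PySem.List.enumerate_append, PySem.List.enumerate]

-- A's inner step, on an already-lowered token, performs Set.add on the token list
theorem pvStep (acc : List String) (t : String) :
    (if (PySem.Dict.keys (pvEnc acc)).contains t then pvEnc acc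
     else PySem.Dict.insert (pvEnc acc) t ((PySem.Dict.size (pvEnc acc) : Int) + 1))
    = pvEnc (PySem.Set.add acc t) := by
  rw [pvEnc_keys, pvEnc_size]
  by_cases h : t ∈ acc
  · simp [PySem.Set.add, PySem.Set.contains, h]
  · have hc : (pvEnc acc).contains t = false := by rw [pvEnc_contains]; simp [h]
    rw [if_neg (by simp [h]), show PySem.Set.add acc t = acc ++ [t] from
      by simp [PySem.Set.add, PySem.Set.contains, h]]
    simp only [PySem.Dict.insert, hc, Bool.false_eq_true, if_false]
    exact (pvEnc_snoc acc t).symm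

theorem pvFold (ts : List String) (acc : List String) :
    ts.foldl (fun d t =>
      if (PySem.Dict.keys d).contains t then d
      else PySem.Dict.insert d t ((PySem.Dict.size d : Int) + 1)) (pvEnc acc)
    = pvEnc (ts.foldl PySem.Set.add acc) := by
  induction ts generalizing acc with
  | nil => rfl
  | cons t ts ih => simp only [List.foldl_cons, pvStep, ih]

-- nested loop over sentences = one loop over the flattened, lower-mapped token stream
theorem pvFlatten {β : Type} (f : β → String → β) (g : String → String)
    (data : List (List String)) (d : β) :
    data.foldl (fun d s => s.foldl (fun d t => f d (g t)) d) d
    = ((data.flatMap (fun s => s)).map g).foldl f d := by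
  induction data generalizing d with
  | nil => rfl
  | cons s rest ih => simp [List.foldl_append, List.foldl_map, ih]

-- the distinct-token list, in first-occurrence order, is strictly increasing on first index
theorem pvPairwise (xs : List String) :
    (PySem.Set.ofList xs).Pairwise
      (fun a b => (PySem.List.index? xs a).getD 0 < (PySem.List.index? xs b).getD 0) := by
  induction xs using List.reverseRecOn with
  | nil => simp [PySem.Set.ofList]
  | append_singleton xs x ih =>
    have hof : PySem.Set.ofList (xs ++ [x]) = PySem.Set.add (PySem.Set.ofList xs) x := by
      simp [PySem.Set.ofList_eq_foldl, List.foldl_append]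
    rw [hof]
    have hmem : ∀ a ∈ PySem.Set.ofList xs, a ∈ xs := fun a ha => (PySem.Set.mem_ofList _ _).1 ha
    have hidx : ∀ a ∈ xs, PySem.List.index? (xs ++ [x]) a = PySem.List.index? xs a :=
      fun a ha => PySem.List.index?_append_of_mem [x] ha
    by_cases hx : x ∈ PySem.Set.ofList xs
    · rw [PySem.Set.add_of_mem hx]
      exact ih.imp_of_mem (fun {a b} ha hb h => by
        rw [hidx a (hmem a ha), hidx b (hmem b hb)]; exact h)
    · have hxs : x ∉ xs := fun h => hx ((PySem.Set.mem_ofList _ _).2 h)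
      rw [PySem.Set.add_of_not_mem hx, List.pairwise_append]
      refine ⟨ih.imp_of_mem (fun {a b} ha hb h => by
        rw [hidx a (hmem a ha), hidx b (hmem b hb)]; exact h), by simp, ?_⟩
      intro a ha b hb
      rw [List.mem_singleton] at hb; subst hb
      have haxs := hmem a ha
      rw [hidx a haxs, PySem.List.index?_append_singleton_self xs _ hxs]
      obtain ⟨k, hk⟩ := Option.isSome_iff_exists.1 ((PySem.List.index?_isSome_iff xs a).2 haxs)
      obtain ⟨hklt, -, -⟩ := PySem.List.getElem_of_index?_eq_some hk
      rw [hk]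
      simpa using hklt

-- the backward-overwrite dict maps each token of the stream to its FIRST position
theorem pvGet (stream : List String) (t : String) (k : Nat)
    (hk : PySem.List.index? stream t = some k) (s : Int) (d : PySem.Dict String Int) :
    ((PySem.List.enumerate stream s).reverse.foldl
      (fun d p => PySem.Dict.insert d p.2 p.1) d).get? t = some (s + k) := by
  induction stream generalizing s d k with
  | nil => simp [PySem.List.index?] at hk
  | cons x xs ih =>
    rw [PySem.List.enumerate_cons, List.reverse_cons, List.foldl_append]
    by_cases hx : x = t
    · subst hx
      rw [PySem.List.index?_cons_self] at hk
      cases hk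
      simp [List.foldl, PySem.Dict.get?_insert_self]
    · rw [PySem.List.index?_cons_of_ne xs hx] at hk
      obtain ⟨k', hk', rfl⟩ := Option.map_eq_some_iff.1 hk
      simp only [List.foldl_cons, List.foldl_nil]
      have hne : t ≠ x := fun h => hx h.symm
      rw [PySem.Dict.get?_insert_of_ne _ s hne, ih k' hk' (s + 1) d]
      congr 1
      push_cast
      ring

-- its keys are the distinct tokens (in last-occurrence-first order)
theorem pvKeys (stream : List String) :
    ((PySem.List.enumerate stream 0).reverse.foldl
      (fun d p => PySem.Dict.insert d p.2 p.1)
      (PySem.Dict.empty : PySem.Dict String Int)).keys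
    = PySem.Set.ofList stream.reverse := by
  rw [show (fun (d : PySem.Dict String Int) (p : Int × String) => PySem.Dict.insert d p.2 p.1)
      = (fun d p => PySem.Dict.insert d ((·.2) p) ((fun (_ : PySem.Dict String Int) (p : Int × String) => p.1) d p)) from rfl,
    PySem.Dict.keys_foldl_insert_key]
  rw [PySem.Dict.keys_empty, PySem.Set.update_nil_left, List.map_reverse,
    PySem.List.map_snd_enumerate]

-- the whole pipeline, for any already-lowered token stream
theorem pvMain (stream : List String) :
    (stream.foldl (fun d t =>
      if (PySem.Dict.keys d).contains t then d
      else PySem.Dict.insert d t ((PySem.Dict.size d : Int) + 1)) PySem.Dict.empty).items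
    = (PySem.List.enumerate (PySem.List.sorted
        (PySem.Dict.keys ((PySem.List.enumerate stream 0).reverse.foldl
          (fun d p => PySem.Dict.insert d p.2 p.1) (PySem.Dict.empty : PySem.Dict String Int)))
        (fun tok => (PySem.Dict.get? ((PySem.List.enumerate stream 0).reverse.foldl
          (fun d p => PySem.Dict.insert d p.2 p.1) (PySem.Dict.empty : PySem.Dict String Int)) tok).getD 0)
        false) 0).map (fun p => (p.2, p.1 + 1)) := by
  have hidxkey : ∀ a ∈ PySem.Set.ofList stream,
      (PySem.Dict.get? ((PySem.List.enumerate stream 0).reverse.foldl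
        (fun d p => PySem.Dict.insert d p.2 p.1) (PySem.Dict.empty : PySem.Dict String Int)) a).getD 0
      = (((PySem.List.index? stream a).getD 0 : Nat) : Int) := by
    intro a ha
    obtain ⟨k, hk⟩ := Option.isSome_iff_exists.1
      ((PySem.List.index?_isSome_iff stream a).2 ((PySem.Set.mem_ofList _ _).1 ha))
    rw [pvGet stream a k hk 0 PySem.Dict.empty, hk]
    simp
  have hperm : (PySem.Set.ofList stream).Perm (PySem.Set.ofList stream.reverse) := by
    rw [List.perm_ext_iff_of_nodup (PySem.Set.nodup_ofList _) (PySem.Set.nodup_ofList _)]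
    intro a
    rw [PySem.Set.mem_ofList, PySem.Set.mem_ofList, List.mem_reverse]
  have hpw : (PySem.Set.ofList stream).Pairwise (fun a b =>
      (PySem.Dict.get? ((PySem.List.enumerate stream 0).reverse.foldl
        (fun d p => PySem.Dict.insert d p.2 p.1) (PySem.Dict.empty : PySem.Dict String Int)) a).getD 0
      < (PySem.Dict.get? ((PySem.List.enumerate stream 0).reverse.foldl
        (fun d p => PySem.Dict.insert d p.2 p.1) (PySem.Dict.empty : PySem.Dict String Int)) b).getD 0) := by
    refine (pvPairwise stream).imp_of_mem (fun {a b} ha hb h => ?_)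
    rw [hidxkey a ha, hidxkey b hb]
    exact_mod_cast h
  rw [pvKeys, PySem.List.sorted_eq_of_perm_of_pairwise_lt _ _ _ hperm hpw,
      show (PySem.Dict.empty : PySem.Dict String Int) = pvEnc [] from rfl, pvFold,
      ← PySem.Set.ofList_eq_foldl]
  rfl

-- ===== VERDICT (by name: the statement is the Claim_ definition above) =====
theorem tokenToId_spec : Claim_equal_tokenToId := by
  intro data lower _
  show tokenToId data lower = tokenToId_alt data lower
  unfold tokenToId tokenToId_alt
  rw [pvFlatten
    (fun d t => if (PySem.Dict.keys d).contains t then d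
      else PySem.Dict.insert d t ((PySem.Dict.size d : Int) + 1))
    (fun token => if lower == true then PySem.Str.lower token else token) data PySem.Dict.empty,
    show ((data.flatMap (fun s => s)).map
      (fun token => if lower == true then PySem.Str.lower token else token))
      = (if lower == true then (data.flatMap (fun sentence => sentence)).map PySem.Str.lower
         else data.flatMap (fun sentence => sentence)) from by cases lower <;> simp]
  exact pvMain _
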